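-- pv_equiv track=rewrite | github.com/981377660LMT/algorithm-study | 22_专题/计算贡献/3284. 连续子数组的和.py | enumetateConsecutiveSubarrays
-- ===== SOURCE A (Python) =====
-- from typing import Generator, List, Tuple
--
-- def enumetateConsecutiveSubarrays(
--     nums: List[int], diff=1
-- ) -> Generator[Tuple[int, int], None, None]:
--     """遍历连续的子数组.
--
--     >>> list(enumetateConsecutiveSubarrays([1, 2, 3, 5, 6, 7, 9]))
--     [(0, 3), (3, 6), (6, 7)]
--     """
--     i, n = 0, len(nums)
--     while i < n:
--         start = i
--         while i < n - 1 and nums[i] + diff == nums[i + 1]: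
--             i += 1
--         i += 1
--         yield start, i
-- ===== SOURCE B (Python) =====
-- from typing import Generator, List, Tuple
--
-- def enumetateConsecutiveSubarrays(
--     nums: List[int], diff=1
-- ) -> Generator[Tuple[int, int], None, None]:
--     """Boundary-table decomposition: collect break indices, then zip consecutive bounds."""
--     if not nums:
--         return
--     n = len(nums)
--     breaks = [i for i in range(1, n) if nums[i - 1] + diff != nums[i]]
--     bounds = [0] + breaks + [n]
--     for a, b in zip(bounds, bounds[1:]):
--         yield a, b
-- ===== Notes on version B (the rewrite author's own statement) =====
-- stated objective: alternative
-- what changed: Replaces the nested run-consuming while-loops with a boundary-table decomposition: one comprehension collects the break indices, then consecutive bounds are zipped into ranges.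
import Mathlib
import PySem

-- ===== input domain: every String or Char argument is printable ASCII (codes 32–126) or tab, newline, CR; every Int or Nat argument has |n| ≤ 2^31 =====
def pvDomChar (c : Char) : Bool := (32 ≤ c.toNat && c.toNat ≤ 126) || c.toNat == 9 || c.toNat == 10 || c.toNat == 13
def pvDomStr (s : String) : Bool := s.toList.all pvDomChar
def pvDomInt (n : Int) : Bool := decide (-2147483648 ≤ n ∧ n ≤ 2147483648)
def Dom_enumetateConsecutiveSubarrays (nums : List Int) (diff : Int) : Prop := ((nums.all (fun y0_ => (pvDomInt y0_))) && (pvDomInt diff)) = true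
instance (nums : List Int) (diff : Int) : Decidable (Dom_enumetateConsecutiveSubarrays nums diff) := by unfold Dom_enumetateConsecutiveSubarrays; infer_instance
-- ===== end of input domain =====

-- B replaces A's nested run-consuming while-loops by a break-index table zipped into ranges; equal output, same O(n) cost.

-- ===== PORT A =====
-- inner while: 'while i < n - 1 and nums[i] + diff == nums[i + 1]: i += 1'
def pvInner (nums : List Int) (diff : Int) (i : Nat) : Nat :=
  if h : i < nums.length - 1 ∧ nums.getD i 0 + diff = nums.getD (i + 1) 0 then
    pvInner nums diff (i + 1)
  else i
termination_by nums.length - 1 - i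
decreasing_by omega

theorem pvInner_ge (nums : List Int) (diff : Int) (i : Nat) : i ≤ pvInner nums diff i := by
  fun_induction pvInner with
  | case1 i h ih => omega
  | case2 i h => omega

-- outer while: 'while i < n: start = i; <inner>; i += 1; yield start, i'
def pvOuter (nums : List Int) (diff : Int) (i : Nat) : List (Nat × Nat) :=
  if h : i < nums.length then
    (i, pvInner nums diff i + 1) :: pvOuter nums diff (pvInner nums diff i + 1)
  else []
termination_by nums.length - i
decreasing_by have := pvInner_ge nums diff i; omega

def enumetateConsecutiveSubarrays (nums : List Int) (diff : Int) : List (Int × Int) :=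
  (pvOuter nums diff 0).map (fun p => ((p.1 : Int), (p.2 : Int)))

-- ===== PORT B =====
def enumetateConsecutiveSubarrays_alt (nums : List Int) (diff : Int) : List (Int × Int) :=
  if nums.isEmpty then []
  else
    let n := nums.length
    -- breaks = [i for i in range(1, n) if nums[i-1] + diff != nums[i]]
    let breaks := (List.range' 1 (n - 1)).filter (fun i => nums.getD (i - 1) 0 + diff ≠ nums.getD i 0)
    let bounds := 0 :: breaks ++ [n]
    (bounds.zip bounds.tail).map (fun p => ((p.1 : Int), (p.2 : Int)))

-- ===== PRECONDITION & SPEC =====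
def Spec_enumetateConsecutiveSubarrays (nums : List Int) (diff : Int) (out : List (Int × Int)) : Prop := out = enumetateConsecutiveSubarrays_alt nums diff
instance (nums : List Int) (diff : Int) (out : List (Int × Int)) : Decidable (Spec_enumetateConsecutiveSubarrays nums diff out) := by unfold Spec_enumetateConsecutiveSubarrays; infer_instance

-- ===== CLAIM (what is proved, stated in full; the proofs are below) =====
def Claim_equal_enumetateConsecutiveSubarrays : Prop := ∀ (nums : List Int) (diff : Int), Dom_enumetateConsecutiveSubarrays nums diff → Spec_enumetateConsecutiveSubarrays nums diff (enumetateConsecutiveSubarrays nums diff)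

-- ===== LEMMAS AND PROOFS =====

-- the break predicate of B
def pvBrk (nums : List Int) (diff : Int) : Nat → Bool :=
  fun i => decide (nums.getD (i - 1) 0 + diff ≠ nums.getD i 0)

theorem pvInner_lt (nums : List Int) (diff : Int) (i : Nat) (hi : i < nums.length) :
    pvInner nums diff i < nums.length := by
  fun_induction pvInner with
  | case1 i h ih => exact ih (by omega)
  | case2 i h => exact hi

theorem pvInner_run (nums : List Int) (diff : Int) (i : Nat) :
    ∀ m, i ≤ m → m < pvInner nums diff i → nums.getD m 0 + diff = nums.getD (m + 1) 0 := by
  fun_induction pvInner with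
  | case1 i h ih =>
      intro m h1 h2
      rcases Nat.eq_or_lt_of_le h1 with rfl | h1'
      · exact h.2
      · exact ih m h1' h2
  | case2 i h => intro m h1 h2; omega

theorem pvInner_stop (nums : List Int) (diff : Int) (i : Nat) :
    ¬ (pvInner nums diff i < nums.length - 1 ∧
       nums.getD (pvInner nums diff i) 0 + diff = nums.getD (pvInner nums diff i + 1) 0) := by
  fun_induction pvInner with
  | case1 i h ih => exact ih
  | case2 i h => exact h

-- consecutive-pair zip of a list
def pvPairs (l : List Nat) : List (Nat × Nat) := l.zip l.tail

-- filter of a stretch with no breaks vanishes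
theorem pvFilter_run_nil (nums : List Int) (diff : Int) (i k : Nat) (hik : i ≤ k)
    (hrun : ∀ m, i ≤ m → m < k → nums.getD m 0 + diff = nums.getD (m + 1) 0) :
    (List.range' (i + 1) (k - i)).filter (pvBrk nums diff) = [] := by
  rw [List.filter_eq_nil_iff]
  intro a ha
  rw [List.mem_range'_1] at ha
  have := hrun (a - 1) (by omega) (by omega)
  rw [show a - 1 + 1 = a by omega] at this
  simp only [pvBrk, ne_eq, decide_not, Bool.not_eq_true']
  simpa [List.getD_eq_getElem?_getD] using this

-- main invariant: the outer loop from i produces the zipped bounds starting at i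
theorem pvOuter_eq (nums : List Int) (diff : Int) (i : Nat) (hi : i < nums.length) :
    pvOuter nums diff i =
      pvPairs (i :: (List.range' (i + 1) (nums.length - (i + 1))).filter (pvBrk nums diff)
                ++ [nums.length]) := by
  generalize hfuel : nums.length - i = fuel
  induction fuel using Nat.strong_induction_on generalizing i with
  | _ fuel ih =>
    obtain ⟨k, hk⟩ : ∃ k, k = pvInner nums diff i := ⟨_, rfl⟩
    have hik : i ≤ k := hk ▸ pvInner_ge nums diff i
    have hkn : k < nums.length := hk ▸ pvInner_lt nums diff i hi
    have hstop := pvInner_stop nums diff i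
    have hrun := pvInner_run nums diff i
    rw [← hk] at hstop hrun
    have hnil := pvFilter_run_nil nums diff i k hik (fun m h1 h2 => hrun m h1 h2)
    have hsplit : List.range' (i + 1) (nums.length - (i + 1)) =
        List.range' (i + 1) (k - i) ++ List.range' (k + 1) (nums.length - (k + 1)) := by
      have h1 : nums.length - (i + 1) = (k - i) + (nums.length - (k + 1)) := by omega
      have h2 : i + 1 + 1 * (k - i) = k + 1 := by omega
      rw [h1, ← List.range'_append, h2]
    rw [pvOuter, dif_pos hi, ← hk, hsplit, List.filter_append, hnil, List.nil_append]
    by_cases hjn : k + 1 = nums.length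
    · have hrest : (List.range' (k + 1) (nums.length - (k + 1))).filter (pvBrk nums diff) = [] := by
        rw [hjn]; simp
      rw [pvOuter, dif_neg (by omega), hrest, hjn]
      rfl
    · have hbrk : pvBrk nums diff (k + 1) = true := by
        simp only [pvBrk, ne_eq, decide_not, Bool.not_eq_true', decide_eq_false_iff_not]
        intro hcontra
        exact hstop ⟨by omega, by simpa using hcontra⟩
      have hrest : (List.range' (k + 1) (nums.length - (k + 1))).filter (pvBrk nums diff) =
          (k + 1) :: (List.range' (k + 1 + 1) (nums.length - (k + 1 + 1))).filter
            (pvBrk nums diff) := by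
        have hm : nums.length - (k + 1) = (nums.length - (k + 1 + 1)) + 1 := by omega
        rw [hm, List.range'_succ, List.filter_cons, if_pos hbrk]
      rw [hrest, ih (nums.length - (k + 1)) (by omega) (k + 1) (by omega) rfl]
      rfl

-- ===== VERDICT (by name: the statement is the Claim_ definition above) =====
theorem enumetateConsecutiveSubarrays_spec : Claim_equal_enumetateConsecutiveSubarrays := by
  intro nums diff _
  unfold Spec_enumetateConsecutiveSubarrays enumetateConsecutiveSubarrays
    enumetateConsecutiveSubarrays_alt
  by_cases hemp : nums.isEmpty
  · rw [if_pos hemp, pvOuter, dif_neg (by simp_all [List.isEmpty_iff])]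
    rfl
  · have hlen : 0 < nums.length := by
      simp only [Bool.not_eq_true, List.isEmpty_eq_false_iff] at hemp
      exact List.length_pos_of_ne_nil hemp
    rw [if_neg hemp, pvOuter_eq nums diff 0 hlen]
    rfl
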